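-- pv_equiv track=rewrite | github.com/trast/git | python/lib/indexlib.py | get_sub_paths
-- ===== SOURCE A (Python) =====
-- def get_sub_paths(path):
--     path = path.split("/")
--
--     pathname = ""
--     paths = list()
--     for p in path:
--         pathname += p + "/"
--         paths.append(pathname.strip("/"))
--     return paths
-- ===== SOURCE B (Python) =====
-- def get_sub_paths(path):
--     parts = path.split("/")
--     return ["/".join(parts[:i + 1]).strip("/") for i in range(len(parts))]
-- ===== Notes on version B (the rewrite author's own statement) =====
-- stated objective: alternative
-- what changed: Instead of extending a running accumulator string across iterations, B rebuilds each cumulative prefix independently by joining a growing slice of the split parts (joining a slice of the parts and stripping slashes) in a comprehension over indices.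
import Mathlib
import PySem

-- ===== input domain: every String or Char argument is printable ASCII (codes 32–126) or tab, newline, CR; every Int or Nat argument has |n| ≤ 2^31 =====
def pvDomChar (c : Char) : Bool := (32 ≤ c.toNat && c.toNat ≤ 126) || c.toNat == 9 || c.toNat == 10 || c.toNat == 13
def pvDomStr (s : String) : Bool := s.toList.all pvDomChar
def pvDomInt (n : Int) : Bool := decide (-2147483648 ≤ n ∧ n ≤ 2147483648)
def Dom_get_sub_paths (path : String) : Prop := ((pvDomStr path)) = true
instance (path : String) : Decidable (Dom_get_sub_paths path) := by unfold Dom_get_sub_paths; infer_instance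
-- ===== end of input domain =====

-- B rebuilds each cumulative prefix independently from a slice of the parts list instead of
-- extending A's running accumulator string; same return value, alternative decomposition.

-- ===== PORT A =====
-- A: split on the slash character, then a loop keeping a running pathname string, appending the stripped pathname each step.
def get_sub_paths (path : String) : List String :=
  let parts := PySem.Chars.splitOn path.toList ['/']
  let st := parts.foldl
    (fun (st : List Char × List (List Char)) p =>
      (st.1 ++ p ++ ['/'], st.2 ++ [PySem.Chars.stripChars (st.1 ++ p ++ ['/']) ['/']]))
    ([], [])
  st.2.map String.ofList

-- ===== PORT B =====
-- B: split on the slash character, then for each index i join a slice of the parts and strip slashes.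
def get_sub_paths_alt (path : String) : List String :=
  let parts := PySem.Chars.splitOn path.toList ['/']
  (List.range parts.length).map
    (fun i => String.ofList (PySem.Chars.stripChars (PySem.Chars.join ['/'] (parts.take (i + 1))) ['/']))

-- ===== PRECONDITION & SPEC =====
def Spec_get_sub_paths (path : String) (out : List String) : Prop := out = get_sub_paths_alt path
instance (path : String) (out : List String) : Decidable (Spec_get_sub_paths path out) := by unfold Spec_get_sub_paths; infer_instance

-- ===== CLAIM (what is proved, stated in full; the proofs are below) =====
def Claim_equal_get_sub_paths : Prop := ∀ (path : String), Dom_get_sub_paths path → Spec_get_sub_paths path (get_sub_paths path)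

-- ===== LEMMAS AND PROOFS =====

-- A's running pathname after consuming the parts in `pref`: "" when nothing consumed, else join + trailing '/'.
def pvJoinS (pref : List (List Char)) : List Char :=
  if pref = [] then [] else PySem.Chars.join ['/'] pref ++ ['/']

theorem pvJoin_append_singleton (pref : List (List Char)) (p : List Char) (h : pref ≠ []) :
    PySem.Chars.join ['/'] (pref ++ [p]) = PySem.Chars.join ['/'] pref ++ ['/'] ++ p := by
  induction pref with
  | nil => exact absurd rfl h
  | cons q rest ih =>
    cases rest with
    | nil => simp [PySem.Chars.join_cons_cons, PySem.Chars.join_singleton]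
    | cons r rest' =>
      have := ih (by simp)
      simp only [List.cons_append, PySem.Chars.join_cons_cons] at *
      simp [this]

theorem pvJoinS_snoc (pref : List (List Char)) (p : List Char) :
    pvJoinS (pref ++ [p]) = pvJoinS pref ++ p ++ ['/'] := by
  cases h : pref with
  | nil => simp [pvJoinS, PySem.Chars.join_singleton]
  | cons q rest =>
    subst h
    simp only [pvJoinS, if_neg (by simp : ¬ (q :: rest) ++ [p] = []), if_neg (by simp : ¬ q :: rest = [])]
    rw [pvJoin_append_singleton (q :: rest) p (by simp)]

-- stripping slashes ignores a trailing slash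
theorem pvStrip_snoc (x : List Char) :
    PySem.Chars.stripChars (x ++ ['/']) ['/'] = PySem.Chars.stripChars x ['/'] := by
  unfold PySem.Chars.stripChars
  dsimp only
  rw [List.dropWhile_append]
  by_cases h : (List.dropWhile (fun c => [('/' : Char)].contains c) x).isEmpty
  · rw [if_pos h]
    rw [List.isEmpty_iff] at h
    rw [h]
    rfl
  · rw [if_neg h, List.reverse_append]
    rw [show (['/'] : List Char).reverse = ['/'] from rfl]
    rw [List.singleton_append, List.dropWhile_cons_of_pos (by rfl)]

-- loop invariant: A's fold from state (pvJoinS pref, acc) produces B's per-index re-joins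
theorem pvLoopA (rest : List (List Char)) : ∀ (pref acc : List (List Char)),
    rest.foldl
      (fun (st : List Char × List (List Char)) p =>
        (st.1 ++ p ++ ['/'], st.2 ++ [PySem.Chars.stripChars (st.1 ++ p ++ ['/']) ['/']]))
      (pvJoinS pref, acc)
    = (pvJoinS (pref ++ rest),
       acc ++ (List.range rest.length).map
         (fun i => PySem.Chars.stripChars (PySem.Chars.join ['/'] (pref ++ rest.take (i + 1))) ['/'])) := by
  induction rest with
  | nil => intro pref acc; simp
  | cons p rest ih =>
    intro pref acc
    simp only [List.foldl_cons]
    have h1 : pvJoinS pref ++ p ++ ['/'] = pvJoinS (pref ++ [p]) := (pvJoinS_snoc pref p).symm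
    have h2 : PySem.Chars.stripChars (pvJoinS (pref ++ [p])) ['/']
        = PySem.Chars.stripChars (PySem.Chars.join ['/'] (pref ++ [p])) ['/'] := by
      simp only [pvJoinS, if_neg (by simp : ¬ pref ++ [p] = [])]
      exact pvStrip_snoc _
    rw [h1, h2, ih (pref ++ [p]) (acc ++ [PySem.Chars.stripChars (PySem.Chars.join ['/'] (pref ++ [p])) ['/']])]
    refine Prod.ext (by simp) ?_
    simp only [List.length_cons, List.range_succ_eq_map, List.map_cons, List.map_map,
      List.append_assoc, List.singleton_append, List.take_succ_cons]
    simp [Function.comp]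

-- ===== VERDICT (by name: the statement is the Claim_ definition above) =====
theorem get_sub_paths_spec : Claim_equal_get_sub_paths := by
  intro path _
  unfold Spec_get_sub_paths get_sub_paths get_sub_paths_alt
  dsimp only
  have h0 : pvJoinS [] = [] := rfl
  have h := pvLoopA (PySem.Chars.splitOn path.toList ['/']) [] []
  rw [h0] at h
  rw [List.nil_append] at h
  rw [h]
  simp [List.map_map, Function.comp]
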